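-- pv_equiv track=rewrite | github.com/scramblingsnail/Labridge | labridge/func_modules/paper/parse/parsers/base.py | match_separators
-- ===== SOURCE A (Python) =====
-- from typing import Union, Tuple, Dict, List, Sequence, Optional
--
-- def match_separators(text: str, separators: Sequence[str], tolerance: int):
-- 	tolerance = max(tolerance, 1)
--
-- 	text = text.replace("\n", "")
-- 	for sep in separators:
-- 		for start in range(tolerance):
-- 			if text[start: start + len(sep)].upper() == sep.upper():
-- 				return True
-- 	return False
-- ===== SOURCE B (Python) =====
-- def match_separators(text, separators, tolerance):
--     tolerance = max(tolerance, 1)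
--     t = text.replace("\n", "").upper()
--     for sep in separators:
--         pos = t.find(sep.upper())
--         if 0 <= pos < tolerance:
--             return True
--     return False
-- ===== Notes on version B (the rewrite author's own statement) =====
-- stated objective: faster
-- what changed: B drops the inner loop over start positions entirely: it uppercases the normalized text once and uses substring search (str.find) per separator, testing whether the first occurrence index is below tolerance.
import Mathlib
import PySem

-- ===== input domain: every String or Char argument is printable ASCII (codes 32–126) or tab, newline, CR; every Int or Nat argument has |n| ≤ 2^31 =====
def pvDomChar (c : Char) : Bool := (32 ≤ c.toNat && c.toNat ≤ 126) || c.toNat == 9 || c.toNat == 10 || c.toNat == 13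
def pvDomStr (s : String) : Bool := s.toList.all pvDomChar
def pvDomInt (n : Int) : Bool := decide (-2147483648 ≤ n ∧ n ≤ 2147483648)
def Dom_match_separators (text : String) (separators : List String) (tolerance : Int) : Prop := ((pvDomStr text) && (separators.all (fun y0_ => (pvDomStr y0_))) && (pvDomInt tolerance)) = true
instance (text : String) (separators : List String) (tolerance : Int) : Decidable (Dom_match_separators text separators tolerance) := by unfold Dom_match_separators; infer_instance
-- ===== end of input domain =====

-- B replaces the nested start-position loop by one substring search (str.find) per separator
-- on the once-uppercased text; measurably faster for large tolerance.

-- ===== PORT A =====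
-- 'for start in range(tolerance): if …: return True' — early-return loop over start
def pvLoopA (t sep : String) (fuel : Nat) (start : Int) : Bool :=
  match fuel with
  | 0 => false
  | Nat.succ n =>
    if PySem.Str.upper (PySem.Str.slice t (some start) (some (start + PySem.Str.len sep))) ==
        PySem.Str.upper sep then true
    else pvLoopA t sep n (start + 1)

def match_separators (text : String) (separators : List String) (tolerance : Int) : Bool :=
  let tol := max tolerance 1
  let t := PySem.Str.replace text "\n" ""
  separators.any (fun sep => pvLoopA t sep tol.toNat 0)

-- ===== PORT B =====
-- Source B: t = text.replace("\n","").upper(); per sep: pos = t.find(sep.upper()); 0 <= pos < tolerance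
def match_separators_alt (text : String) (separators : List String) (tolerance : Int) : Bool :=
  let tol := max tolerance 1
  let t := PySem.Str.upper (PySem.Str.replace text "\n" "")
  separators.any (fun sep =>
    let pos := PySem.Str.find t (PySem.Str.upper sep)
    decide (0 ≤ pos ∧ pos < tol))

-- ===== PRECONDITION & SPEC =====
def Spec_match_separators (text : String) (separators : List String) (tolerance : Int) (out : Bool) : Prop := out = match_separators_alt text separators tolerance
instance (text : String) (separators : List String) (tolerance : Int) (out : Bool) : Decidable (Spec_match_separators text separators tolerance out) := by unfold Spec_match_separators; infer_instance

-- ===== CLAIM (what is proved, stated in full; the proofs are below) =====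
def Claim_equal_match_separators : Prop := ∀ (text : String) (separators : List String) (tolerance : Int), Dom_match_separators text separators tolerance → Spec_match_separators text separators tolerance (match_separators text separators tolerance)

-- ===== LEMMAS AND PROOFS =====

theorem pv_slice_map {α β : Type} (f : α → β) (l : List α) (a? b? : Option Int) :
    (PySem.List.slice l a? b?).map f = PySem.List.slice (l.map f) a? b? := by
  simp [PySem.List.slice, List.map_take, List.map_drop]

theorem pvLoopA_iff (t sep : String) : ∀ (n : Nat) (start : Int),
    pvLoopA t sep n start = true ↔
      ∃ st : Int, start ≤ st ∧ st < start + n ∧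
        PySem.Str.upper (PySem.Str.slice t (some st) (some (st + PySem.Str.len sep))) =
          PySem.Str.upper sep := by
  intro n
  induction n with
  | zero =>
    intro start
    simp only [pvLoopA]
    constructor
    · intro h; cases h
    · rintro ⟨st, h1, h2, -⟩; exfalso; omega
  | succ n ih =>
    intro start
    simp only [pvLoopA]
    split_ifs with hc
    · exact iff_of_true rfl ⟨start, le_refl _, by omega, by simpa using hc⟩
    · rw [ih (start + 1)]
      constructor
      · rintro ⟨st, h1, h2, h3⟩; exact ⟨st, by omega, by omega, h3⟩
      · rintro ⟨st, h1, h2, h3⟩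
        have hne : st ≠ start := by rintro rfl; exact hc (by simpa using h3)
        exact ⟨st, by omega, by omega, h3⟩

-- the window test at nonneg start st equals a prefix test on the dropped list
theorem pv_window_prefix (T U : List Char) (st : Int) (hst : 0 ≤ st) :
    PySem.List.slice T (some st) (some (st + U.length)) = U ↔ U <+: T.drop st.toNat := by
  rw [PySem.List.slice_toNat T hst (by omega)]
  have hn : (st + (U.length : Int)).toNat - st.toNat = U.length := by omega
  rw [hn]
  constructor
  · intro h; rw [← h]; exact List.take_prefix _ _
  · intro h
    have := List.prefix_iff_eq_take.mp h
    exact this.symm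

-- find-based test ↔ existence of a window match below tol
theorem pv_find_window (T U : List Char) (tol : Int) :
    (0 ≤ PySem.Chars.find T U ∧ PySem.Chars.find T U < tol) ↔
      ∃ st : Int, 0 ≤ st ∧ st < tol ∧
        PySem.List.slice T (some st) (some (st + U.length)) = U := by
  constructor
  · rintro ⟨h0, hlt⟩
    refine ⟨PySem.Chars.find T U, h0, hlt, ?_⟩
    rw [pv_window_prefix T U _ h0]
    exact (PySem.Chars.find_spec h0).1
  · rintro ⟨st, h0, hlt, heq⟩
    rw [pv_window_prefix T U st h0] at heq
    have hfind : 0 ≤ PySem.Chars.find T U := by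
      rw [PySem.Chars.find_nonneg_iff, ← PySem.Chars.isIn_iff_infix,
        ← PySem.Chars.exists_prefix_drop_iff_isIn]
      exact ⟨st.toNat, heq⟩
    have hle : PySem.Chars.find T U ≤ st := by
      by_contra hgt
      push Not at hgt
      exact (PySem.Chars.find_spec hfind).2 st.toNat (by omega) heq
    exact ⟨hfind, by omega⟩

-- per separator: A's start loop equals B's find test
theorem pv_per_sep (text sep : String) (tol : Int) (htol : 1 ≤ tol) :
    pvLoopA (PySem.Str.replace text "\n" "") sep tol.toNat 0 =
      (decide (0 ≤ PySem.Str.find (PySem.Str.upper (PySem.Str.replace text "\n" ""))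
          (PySem.Str.upper sep) ∧
        PySem.Str.find (PySem.Str.upper (PySem.Str.replace text "\n" ""))
          (PySem.Str.upper sep) < tol)) := by
  set t := PySem.Str.replace text "\n" "" with ht
  rw [Bool.eq_iff_iff, pvLoopA_iff]
  simp only [decide_eq_true_eq, PySem.Str.find_eq, PySem.Str.toList_upper]
  rw [pv_find_window]
  have hcast : ((tol.toNat : Int)) = tol := by omega
  have hlen : (PySem.Chars.upper sep.toList).length = sep.toList.length := by
    simp [PySem.Chars.upper]
  constructor
  · rintro ⟨st, h0, hlt, heq⟩
    refine ⟨st, h0, by omega, ?_⟩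
    have heq' := congrArg String.toList heq
    simp only [PySem.Str.toList_upper, PySem.Str.toList_slice,
      PySem.Chars.slice_eq_listSlice, PySem.Chars.upper, pv_slice_map] at heq'
    rw [hlen]
    simpa [PySem.Str.len_eq, PySem.Chars.upper] using heq'
  · rintro ⟨st, h0, hlt, heq⟩
    refine ⟨st, h0, by omega, ?_⟩
    rw [← String.toList_inj]
    simp only [PySem.Str.toList_upper, PySem.Str.toList_slice,
      PySem.Chars.slice_eq_listSlice, PySem.Chars.upper, pv_slice_map]
    rw [hlen] at heq
    simpa [PySem.Str.len_eq, PySem.Chars.upper] using heq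

-- ===== VERDICT (by name: the statement is the Claim_ definition above) =====
theorem match_separators_spec : Claim_equal_match_separators := by
  intro text separators tolerance _
  unfold Spec_match_separators match_separators match_separators_alt
  dsimp only
  exact congrArg (fun f => separators.any f)
    (funext fun sep => pv_per_sep text sep (max tolerance 1) (le_max_right _ _))
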